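-- pv_equiv track=rewrite | github.com/Vineeth0102/Accenture | This Year/Aug 26 and 27,2024/pro2.py | Toss
-- ===== SOURCE A (Python) =====
-- def Toss(num : int , Coin : int)->int:
--     count = 0
--     res = 0
--     for i in Coin:
--         if i == 'T':
--             res -= 1
--             count = 0
--         elif i == 'H':
--             res += 2
--             count +=1
--         if count == 3:
--             return res
--     return res
-- ===== SOURCE B (Python) =====
-- def _cut_len(s, cnt):
--     # index (exclusive) right after the toss where the consecutive-H counter
--     # first reaches 3, or None if it never does
--     for i, ch in enumerate(s):
--         if ch == 'H':
--             cnt += 1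
--             if cnt == 3:
--                 return i + 1
--         elif ch == 'T':
--             cnt = 0
--     return None
--
-- def Toss(num, Coin):
--     cut = _cut_len(Coin, 0)
--     prefix = Coin if cut is None else Coin[:cut]
--     return 2 * prefix.count('H') - prefix.count('T')
-- ===== Notes on version B (the rewrite author's own statement) =====
-- stated objective: alternative
-- what changed: B separates the stopping condition from the scoring: one pass finds the cut index where the consecutive-H counter first reaches 3, then the score is computed directly as 2*count('H') - count('T') of that prefix, instead of interleaving score accumulation with the early return.
import Mathlib
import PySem

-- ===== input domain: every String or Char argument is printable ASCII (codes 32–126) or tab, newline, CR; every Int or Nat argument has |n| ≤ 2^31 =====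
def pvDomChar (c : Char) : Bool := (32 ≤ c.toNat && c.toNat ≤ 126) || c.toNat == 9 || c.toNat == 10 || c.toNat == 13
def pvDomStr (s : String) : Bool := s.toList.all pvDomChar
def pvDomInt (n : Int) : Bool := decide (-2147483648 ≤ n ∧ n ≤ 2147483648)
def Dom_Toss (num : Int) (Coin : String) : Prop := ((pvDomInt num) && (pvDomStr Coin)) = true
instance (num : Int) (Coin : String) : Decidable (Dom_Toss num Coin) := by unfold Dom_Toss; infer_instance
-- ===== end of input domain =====

-- B separates the stopping condition (first index where the consecutive-H counter
-- reaches 3) from the scoring (2*#H - #T on the prefix), instead of interleaving them.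

-- ===== PORT A =====
-- loop over the characters carrying (count, res); early 'return res' when count == 3
def tossLoop : List Char → Int → Int → Int
  | [], _, res => res
  | c :: rest, count, res =>
    let (count', res') :=
      if c = 'T' then (0, res - 1)
      else if c = 'H' then (count + 1, res + 2)
      else (count, res)
    if count' = 3 then res' else tossLoop rest count' res'

def Toss (_num : Int) (Coin : String) : Int := tossLoop Coin.toList 0 0

-- ===== PORT B =====
-- _cut_len: index (exclusive) right after the consecutive-H counter first hits 3
def cutLen : List Char → Int → Nat → Option Nat
  | [], _, _ => none
  | c :: rest, cnt, i =>
    if c = 'H' then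
      (if cnt + 1 = 3 then some (i + 1) else cutLen rest (cnt + 1) (i + 1))
    else if c = 'T' then cutLen rest 0 (i + 1)
    else cutLen rest cnt (i + 1)

-- prefix.count('H') for a single char equals List.count on the char list;
-- Coin[:k] with k : Nat is List.take k (exact: k ≥ 0)
def Toss_alt (_num : Int) (Coin : String) : Int :=
  let l := Coin.toList
  let pref := match cutLen l 0 0 with
    | none => l
    | some k => l.take k
  2 * (pref.count 'H' : Int) - (pref.count 'T' : Int)

-- ===== PRECONDITION & SPEC =====
def Spec_Toss (num : Int) (Coin : String) (out : Int) : Prop := out = Toss_alt num Coin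
instance (num : Int) (Coin : String) (out : Int) : Decidable (Spec_Toss num Coin out) := by unfold Spec_Toss; infer_instance

-- ===== CLAIM (what is proved, stated in full; the proofs are below) =====
def Claim_equal_Toss : Prop := ∀ (num : Int) (Coin : String), Dom_Toss num Coin → Spec_Toss num Coin (Toss num Coin)

-- ===== LEMMAS AND PROOFS =====

def scoreOf (l : List Char) : Int := 2 * (l.count 'H' : Int) - (l.count 'T' : Int)

def cutPrefix (l : List Char) (cnt : Int) : List Char :=
  match cutLen l cnt 0 with
  | none => l
  | some k => l.take k

-- cutLen only shifts its index argument
theorem cutLen_shift (l : List Char) (cnt : Int) (i : Nat) :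
    cutLen l cnt i = (cutLen l cnt 0).map (· + i) := by
  induction l generalizing cnt i with
  | nil => simp [cutLen]
  | cons c rest ih =>
    simp only [cutLen]
    split_ifs with h1 h2 h3
    · simp; omega
    · rw [ih _ (i+1), ih _ 1, Option.map_map]
      congr 1; funext x; simp; omega
    · rw [ih _ (i+1), ih _ 1, Option.map_map]
      congr 1; funext x; simp; omega
    · rw [ih _ (i+1), ih _ 1, Option.map_map]
      congr 1; funext x; simp; omega

theorem cutPrefix_cons (c : Char) (rest : List Char) (cnt cnt' : Int)
    (h : cutLen (c :: rest) cnt 0 = (cutLen rest cnt' 1)) :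
    cutPrefix (c :: rest) cnt = c :: cutPrefix rest cnt' := by
  unfold cutPrefix
  rw [h, cutLen_shift rest cnt' 1]
  cases hc : cutLen rest cnt' 0 with
  | none => simp
  | some k => simp [List.take_succ_cons]

theorem tossLoop_eq (l : List Char) (cnt res : Int) (h : cnt ≠ 3) :
    tossLoop l cnt res = res + scoreOf (cutPrefix l cnt) := by
  induction l generalizing cnt res with
  | nil => simp [tossLoop, cutPrefix, cutLen, scoreOf]
  | cons c rest ih =>
    by_cases hT : c = 'T'
    · have hpre : cutPrefix (c :: rest) cnt = c :: cutPrefix rest 0 := by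
        apply cutPrefix_cons
        simp [cutLen, hT]
      rw [hpre]
      simp only [tossLoop, hT, if_true]
      rw [ih 0 (res - 1) (by decide)]
      simp [scoreOf]
      omega
    · by_cases hH : c = 'H'
      · by_cases h3 : cnt + 1 = 3
        · have hpre : cutPrefix (c :: rest) cnt = [c] := by
            unfold cutPrefix
            simp [cutLen, hH, h3]
          rw [hpre]
          simp only [tossLoop, if_neg hT, if_pos hH, if_pos h3]
          simp [scoreOf, hH]
        · have hpre : cutPrefix (c :: rest) cnt = c :: cutPrefix rest (cnt + 1) := by
            apply cutPrefix_cons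
            simp [cutLen, hH, h3]
          rw [hpre]
          simp only [tossLoop, if_neg hT, if_pos hH, if_neg h3]
          rw [ih (cnt + 1) (res + 2) h3]
          simp [scoreOf, hH]
          omega
      · have hpre : cutPrefix (c :: rest) cnt = c :: cutPrefix rest cnt := by
          apply cutPrefix_cons
          simp [cutLen, hH, hT]
        rw [hpre]
        simp only [tossLoop, if_neg hT, if_neg hH, if_neg h]
        rw [ih cnt res h]
        simp [scoreOf, hH, hT]

-- ===== VERDICT (by name: the statement is the Claim_ definition above) =====
theorem Toss_spec : Claim_equal_Toss := by
  intro num Coin _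
  unfold Spec_Toss Toss Toss_alt
  rw [tossLoop_eq Coin.toList 0 0 (by decide)]
  simp only [scoreOf, cutPrefix]
  omega
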